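-- pv_equiv track=rewrite | github.com/VorobiovKir/caesar_proj | caesar/main/methods.py | possibleRot
-- ===== SOURCE A (Python) =====
-- def countChar(text):
--
--     resDict = {}
--
--     for char in text:
--         if char.isalpha():
--             if not resDict.get(char):
--                 resDict[char] = 1
--             else:
--                 resDict[char] += 1
--         else:
--             continue
--
--     return resDict
--
-- def possibleRot(text):
--     letter_dict = countChar(text)
--     max_count_lett = max(letter_dict, key=letter_dict.get)
--     ordering_lett = [101, 97, 104, 111, 105, 110]
--     if len(text) > 10:
--         if ord(max_count_lett) in ordering_lett:
--             return 'We think, you don\'t need to encrypt your text!'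
--         else:
--             return 'We think, you can try ' + \
--                 ', '.join([str(abs(i - ord(max_count_lett))) for i in ordering_lett]) + \
--                 ' ROT\'S to encrypt your text'
--     else:
--         return 'It\'s too short, we can\'t analyzing your text'
-- ===== SOURCE B (Python) =====
-- def possibleRot(text):
--     # Sort-and-scan: run-length encode the sorted letters, then pick the best run
--     # (largest multiplicity, ties by earliest first occurrence in the text).
--     if len(text) <= 10:
--         return 'It\'s too short, we can\'t analyzing your text'
--     letters = sorted(c for c in text if c.isalpha())
--     runs = []
--     i = 0
--     while i < len(letters):
--         j = i
--         while j < len(letters) and letters[j] == letters[i]: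
--             j += 1
--         runs.append((letters[i], j - i))
--         i = j
--     best = runs[0]
--     for cand in runs[1:]:
--         if cand[1] > best[1] or (cand[1] == best[1] and text.index(cand[0]) < text.index(best[0])):
--             best = cand
--     code = ord(best[0])
--     ordering_lett = [101, 97, 104, 111, 105, 110]
--     if code in ordering_lett:
--         return 'We think, you don\'t need to encrypt your text!'
--     return 'We think, you can try ' + \
--         ', '.join(str(abs(i - code)) for i in ordering_lett) + \
--         ' ROT\'S to encrypt your text'
-- ===== Notes on version B (the rewrite author's own statement) =====
-- stated objective: alternative
-- what changed: B drops the frequency dictionary entirely: it sorts the alphabetic characters, run-length encodes the sorted list into (letter, multiplicity) pairs, and picks the best pair (largest multiplicity, ties by earliest first occurrence via text.index) behind an early length guard; correct because A's insertion-order argmax is exactly the unique letter maximizing (count, -first occurrence).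
import Mathlib
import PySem

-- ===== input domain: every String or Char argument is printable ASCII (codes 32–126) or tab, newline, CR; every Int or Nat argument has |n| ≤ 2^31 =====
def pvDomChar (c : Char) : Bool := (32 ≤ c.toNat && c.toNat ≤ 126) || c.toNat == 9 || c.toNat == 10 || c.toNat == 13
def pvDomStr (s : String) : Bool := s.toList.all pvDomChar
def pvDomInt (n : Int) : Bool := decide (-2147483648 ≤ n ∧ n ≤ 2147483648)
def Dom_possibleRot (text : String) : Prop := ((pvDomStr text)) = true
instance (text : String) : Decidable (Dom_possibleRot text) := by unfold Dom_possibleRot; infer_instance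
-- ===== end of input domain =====

-- B replaces the frequency dictionary by a sort-and-scan: it run-length encodes the sorted
-- letters and keeps the best run (largest multiplicity, ties by earliest occurrence in the text).

-- ===== PORT A =====
def countChar (text : String) : PySem.Dict Char Int :=
  text.toList.foldl
    (fun d c =>
      if PySem.Chars.isalpha c then
        if ((d.get? c).getD 0) == 0 then d.insert c 1 else d.modify c 0 (· + 1)
      else d)
    PySem.Dict.empty

def possibleRot (text : String) : String :=
  let letter_dict := countChar text
  match PySem.List.max? letter_dict.keys (fun k => (letter_dict.get? k).getD 0) with
  | none => ""   -- unreachable under Pre_possibleRot: Python's max([]) raises ValueError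
  | some max_count_lett =>
    let ordering_lett : List Int := [101, 97, 104, 111, 105, 110]
    if (text.toList.length : Int) > 10 then
      if ((max_count_lett.toNat : Int)) ∈ ordering_lett then
        "We think, you don't need to encrypt your text!"
      else
        "We think, you can try " ++
          PySem.Str.join ", " (ordering_lett.map (fun i => PySem.Int.toStr |i - (max_count_lett.toNat : Int)|)) ++
          " ROT'S to encrypt your text"
    else
      "It's too short, we can't analyzing your text"

-- ===== PORT B =====
-- the two nested while loops of B's run-length scan: the inner while consumes the equal
-- block (takeWhile/dropWhile), the outer while is this recursion over the remainder
def pvRuns : List Char → List (Char × Int)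
  | [] => []
  | c :: rest =>
    (c, 1 + ((rest.takeWhile (fun x => x == c)).length : Int)) ::
      pvRuns (rest.dropWhile (fun x => x == c))
termination_by l => l.length
decreasing_by
  have := List.length_dropWhile_le (p := fun x => x == c) (l := rest)
  simp only [List.length_cons]; omega

def possibleRot_alt (text : String) : String :=
  if (text.toList.length : Int) ≤ 10 then "It's too short, we can't analyzing your text"
  else
    let letters := PySem.List.sorted (text.toList.filter PySem.Chars.isalpha) (fun c => c) false
    match pvRuns letters with
    | [] => ""   -- Python: runs[0] raises IndexError here; unreachable under Pre_possibleRot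
    | b :: rest =>
      -- text.index(c): exact via idxOf, since every candidate c occurs in text
      let idx : Char → Int := fun c => (text.toList.idxOf c : Int)
      let best := rest.foldl (fun best cand =>
        if cand.2 > best.2 ∨ (cand.2 = best.2 ∧ idx cand.1 < idx best.1) then cand else best) b
      let code : Int := best.1.toNat
      let ordering_lett : List Int := [101, 97, 104, 111, 105, 110]
      if code ∈ ordering_lett then "We think, you don't need to encrypt your text!"
      else
        "We think, you can try " ++
          PySem.Str.join ", " (ordering_lett.map (fun i => PySem.Int.toStr |i - code|)) ++
          " ROT'S to encrypt your text"

-- ===== PRECONDITION & SPEC =====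
-- Pre_ excludes texts with no alphabetic character: there Python's max gets an empty dict and
-- raises ValueError in A (and B either returns the short-text message or hits runs[0] -> IndexError).
def Pre_possibleRot (text : String) : Prop :=
  (text.toList.any PySem.Chars.isalpha) = true
instance (text : String) : Decidable (Pre_possibleRot text) := by unfold Pre_possibleRot; infer_instance

def pvWitness_possibleRot : String := "hello world"

def Spec_possibleRot (text : String) (out : String) : Prop := out = possibleRot_alt text
instance (text : String) (out : String) : Decidable (Spec_possibleRot text out) := by unfold Spec_possibleRot; infer_instance

-- ===== CLAIM (what is proved, stated in full; the proofs are below) =====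
def Claim_equal_possibleRot : Prop :=
  ∀ (text : String), Dom_possibleRot text → Pre_possibleRot text → Spec_possibleRot text (possibleRot text)

-- ===== LEMMAS AND PROOFS =====

-- A's hand-rolled counting dict is Counter(filtered alpha chars).
theorem countChar_eq (text : String) :
    countChar text = PySem.Dict.counter (text.toList.filter PySem.Chars.isalpha) := by
  unfold countChar
  rw [PySem.Dict.counter_eq_foldl, List.foldl_filter]
  congr 1
  funext d c
  by_cases h : PySem.Chars.isalpha c
  · simp only [h, if_true, PySem.Dict.modify]
    by_cases h0 : ((d.get? c).getD 0) = 0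
    · simp [PySem.Dict.getD, h0]
    · simp [PySem.Dict.getD, h0]
  · simp [h]

-- max? only looks at the key function on members of the list.
theorem max?_congr_mem {α κ : Type} [LT κ] [DecidableLT κ] (xs : List α) (k1 k2 : α → κ)
    (h : ∀ x ∈ xs, k1 x = k2 x) : PySem.List.max? xs k1 = PySem.List.max? xs k2 := by
  unfold PySem.List.max?
  induction xs with
  | nil => rfl
  | cons a t ih =>
    have ha := h a (by simp)
    have ht : ∀ x ∈ t, k1 x = k2 x := fun x hx => h x (by simp [hx])
    simp only [List.foldl_cons]
    have : ∀ (acc : Option α) (l : List α), (∀ x ∈ l, k1 x = k2 x) →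
        (acc = none ∨ ∃ m, acc = some m ∧ k1 m = k2 m) →
        l.foldl (fun acc x => match acc with
          | none => some x
          | some m => if k1 m < k1 x then some x else some m) acc
        = l.foldl (fun acc x => match acc with
          | none => some x
          | some m => if k2 m < k2 x then some x else some m) acc := by
      intro acc l
      induction l generalizing acc with
      | nil => intro _ _; rfl
      | cons b u ihu =>
        intro hl hacc
        have hb := hl b (by simp)
        have hu : ∀ x ∈ u, k1 x = k2 x := fun x hx => hl x (by simp [hx])
        rcases hacc with rfl | ⟨m, rfl, hm⟩
        · simp only [List.foldl_cons]
          exact ihu _ hu (Or.inr ⟨b, rfl, hb⟩)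
        · simp only [List.foldl_cons, hm, hb]
          split
          · exact ihu _ hu (Or.inr ⟨b, rfl, hb⟩)
          · exact ihu _ hu (Or.inr ⟨m, rfl, hm⟩)
    exact this (some a) t ht (Or.inr ⟨a, rfl, ha⟩)

-- A's argmax over the counting dict, in canonical form
theorem max?_eq (text : String) :
    PySem.List.max? (countChar text).keys (fun k => ((countChar text).get? k).getD 0)
      = PySem.List.max? (PySem.List.dedup (text.toList.filter PySem.Chars.isalpha))
          (fun c => (text.toList.count c : Int)) := by
  rw [countChar_eq, PySem.Dict.keys_counter, ← PySem.List.dedup_eq_ofList]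
  apply max?_congr_mem
  intro c hc
  have hc' : c ∈ text.toList.filter PySem.Chars.isalpha :=
    (PySem.List.mem_dedup _ _).1 hc
  have halpha : PySem.Chars.isalpha c = true := (List.mem_filter.1 hc').2
  have : ((PySem.Dict.counter (text.toList.filter PySem.Chars.isalpha)).get? c).getD 0
      = (PySem.Dict.counter (text.toList.filter PySem.Chars.isalpha)).getD c 0 := by
    simp [PySem.Dict.getD]
  rw [this, PySem.Dict.getD_counter]
  congr 1
  exact List.count_filter halpha

-- max? with a nonempty list is the plain running-max fold from the head
theorem max?_cons {α κ : Type} [LT κ] [DecidableLT κ] (x : α) (t : List α) (key : α → κ) :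
    PySem.List.max? (x :: t) key
      = some (t.foldl (fun m y => if key m < key y then y else m) x) := by
  unfold PySem.List.max?
  simp only [List.foldl_cons]
  induction t generalizing x with
  | nil => rfl
  | cons y u ih =>
    simp only [List.foldl_cons]
    by_cases hk : key x < key y
    · simp only [hk, if_pos]
      exact ih y
    · simp only [hk, if_false]
      exact ih x

-- the leftmost-argmax fold dominates everything it saw, provided the traversal order is
-- strictly increasing under f (used with f = first index in the text)
theorem fold_dom (key : Char → Int) (f : Char → Nat) :
    ∀ (ts : List Char) (m : Char), (∀ x ∈ ts, f m < f x) →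
      ts.Pairwise (fun a b => f a < f b) →
      (ts.foldl (fun m y => if key m < key y then y else m) m = m ∨
        ts.foldl (fun m y => if key m < key y then y else m) m ∈ ts) ∧
      ∀ x ∈ m :: ts,
        key x ≤ key (ts.foldl (fun m y => if key m < key y then y else m) m) ∧
        (key x = key (ts.foldl (fun m y => if key m < key y then y else m) m) →
          f (ts.foldl (fun m y => if key m < key y then y else m) m) ≤ f x) := by
  intro ts
  induction ts with
  | nil =>
    intro m _ _
    refine ⟨Or.inl rfl, ?_⟩
    intro x hx
    simp only [List.mem_singleton] at hx
    subst hx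
    exact ⟨le_refl _, fun _ => le_refl _⟩
  | cons y u ih =>
    intro m hlt hpw
    have hy : f m < f y := hlt y (by simp)
    have hyu : ∀ x ∈ u, f y < f x := fun x hx => (List.pairwise_cons.1 hpw).1 x hx
    have hpwu : u.Pairwise (fun a b => f a < f b) := (List.pairwise_cons.1 hpw).2
    simp only [List.foldl_cons]
    by_cases hk : key m < key y
    · simp only [hk, if_pos]
      obtain ⟨hmem, hdom⟩ := ih y hyu hpwu
      refine ⟨?_, ?_⟩
      · rcases hmem with h | h
        · exact Or.inr (by simp [h])
        · exact Or.inr (by simp [h])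
      · intro x hx
        rcases List.mem_cons.1 hx with hxm | hx'
        · rw [hxm]
          obtain ⟨h1, h2⟩ := hdom y (by simp)
          refine ⟨le_trans (le_of_lt hk) h1, fun he => ?_⟩
          omega
        · exact hdom x hx'
    · simp only [hk, if_false]
      have hym : key y ≤ key m := le_of_not_gt hk
      obtain ⟨hmem, hdom⟩ := ih m (fun x hx => lt_trans hy (hyu x hx)) hpwu
      refine ⟨?_, ?_⟩
      · rcases hmem with h | h
        · exact Or.inl h
        · exact Or.inr (by simp [h])
      · intro x hx
        rcases List.mem_cons.1 hx with hxm | hx'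
        · rw [hxm]
          exact hdom m (by simp)
        · rcases List.mem_cons.1 hx' with hxy | hx''
          · rw [hxy]
            obtain ⟨h1, h2⟩ := hdom m (by simp)
            refine ⟨le_trans hym h1, fun he => ?_⟩
            have hfm := h2 (by omega)
            omega
          · exact hdom x (by simp [hx''])

-- the foldl-add invariant behind dedup: the accumulator holds exactly the distinct
-- elements of the processed prefix, in first-occurrence order
theorem dedup_add_aux (l : List Char) : ∀ (rest pre s : List Char), l = pre ++ rest →
    (∀ a, a ∈ s ↔ a ∈ pre) → s.Pairwise (fun a b => l.idxOf a < l.idxOf b) →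
    (List.foldl PySem.Set.add s rest).Pairwise (fun a b => l.idxOf a < l.idxOf b) := by
  intro rest
  induction rest with
  | nil => intro pre s _ _ hp; simpa using hp
  | cons y u ih =>
    intro pre s hl hmem hp
    simp only [List.foldl_cons]
    apply ih (pre ++ [y])
    · rw [hl, List.append_assoc]; rfl
    · intro a
      rw [PySem.Set.mem_add]
      simp only [List.mem_append, List.mem_singleton]
      rw [hmem]
    · by_cases hy : y ∈ s
      · have : PySem.Set.add s y = s := by
          unfold PySem.Set.add
          rw [if_pos ((PySem.Set.contains_iff s y).2 hy)]
        rw [this]; exact hp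
      · have : PySem.Set.add s y = s ++ [y] := by
          unfold PySem.Set.add
          rw [if_neg (by simpa [PySem.Set.contains_iff] using hy)]
        rw [this, List.pairwise_append]
        refine ⟨hp, List.pairwise_singleton _ _, ?_⟩
        intro a has b hbs
        simp only [List.mem_singleton] at hbs
        subst hbs
        have hapre : a ∈ pre := (hmem a).1 has
        have hbpre : b ∉ pre := fun hc => hy ((hmem b).2 hc)
        have h1 : l.idxOf a < pre.length := by
          rw [hl, List.idxOf_append, if_pos hapre]
          exact List.idxOf_lt_length_iff.mpr hapre
        have h2 : l.idxOf b = pre.length := by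
          rw [hl, List.idxOf_append, if_neg hbpre]
          simp
        omega

-- dedup lists its elements in order of first occurrence
theorem dedup_pairwise_idxOf (l : List Char) :
    (PySem.List.dedup l).Pairwise (fun a b => l.idxOf a < l.idxOf b) := by
  have := dedup_add_aux l l [] [] rfl (by intro a; simp) List.Pairwise.nil
  simpa [PySem.List.dedup, PySem.Set.ofList, PySem.Set.empty] using this

-- (x :: l).index(v) for v ≠ x shifts by one
theorem idxOf_cons_ne' (x v : Char) (l : List Char) (h : x ≠ v) :
    List.idxOf v (x :: l) = List.idxOf v l + 1 := by
  rw [List.idxOf_cons]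
  simp [Bool.cond_eq_ite, beq_iff_eq, h]

-- first-occurrence order in a filtered list agrees with first-occurrence order in the list
theorem idxOf_filter_lt (p : Char → Bool) (t : List Char) (a b : Char)
    (ha : a ∈ t.filter p) (hb : b ∈ t.filter p)
    (h : (t.filter p).idxOf a < (t.filter p).idxOf b) : t.idxOf a < t.idxOf b := by
  induction t with
  | nil => simp at ha
  | cons x rest ih =>
    by_cases hpx : p x
    · rw [List.filter_cons_of_pos hpx] at ha hb h
      by_cases hax : a = x
      · subst hax
        have hbx : b ≠ a := by
          intro hba
          subst hba
          exact lt_irrefl _ h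
        rw [List.idxOf_cons_self, idxOf_cons_ne' _ _ _ (Ne.symm hbx)]
        omega
      · by_cases hbx : b = x
        · subst hbx
          rw [idxOf_cons_ne' _ _ _ (fun hc => hax hc.symm), List.idxOf_cons_self] at h
          omega
        · have ha' : a ∈ rest.filter p := by
            rcases List.mem_cons.1 ha with hc | hc
            · exact absurd hc hax
            · exact hc
          have hb' : b ∈ rest.filter p := by
            rcases List.mem_cons.1 hb with hc | hc
            · exact absurd hc hbx
            · exact hc
          rw [idxOf_cons_ne' _ _ _ (fun hc => hax hc.symm),
              idxOf_cons_ne' _ _ _ (fun hc => hbx hc.symm)] at h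
          have := ih ha' hb' (by omega)
          rw [idxOf_cons_ne' _ _ _ (fun hc => hax hc.symm),
              idxOf_cons_ne' _ _ _ (fun hc => hbx hc.symm)]
          omega
    · rw [List.filter_cons_of_neg hpx] at ha hb h
      have hax : a ≠ x := fun hc => hpx (hc ▸ (List.mem_filter.1 ha).2)
      have hbx : b ≠ x := fun hc => hpx (hc ▸ (List.mem_filter.1 hb).2)
      have := ih ha hb h
      rw [idxOf_cons_ne' _ _ _ (Ne.symm hax), idxOf_cons_ne' _ _ _ (Ne.symm hbx)]
      omega

theorem idxOf_inj (t : List Char) {a b : Char} (ha : a ∈ t) (hb : b ∈ t)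
    (h : t.idxOf a = t.idxOf b) : a = b := by
  have h1 : t.idxOf a < t.length := List.idxOf_lt_length_iff.mpr ha
  have h2 : t.idxOf b < t.length := List.idxOf_lt_length_iff.mpr hb
  have e1 : t[t.idxOf a]? = some a := by
    rw [List.getElem?_eq_getElem h1, List.getElem_idxOf h1]
  have e2 : t[t.idxOf b]? = some b := by
    rw [List.getElem?_eq_getElem h2, List.getElem_idxOf h2]
  rw [h, e2] at e1
  exact (Option.some_inj.mp e1).symm

-- run-length pairs of a sorted list: each pair is (letter, its count), and every letter occurs
-- in a sorted list every copy of the minimum c is consumed by dropWhile (== c)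
theorem not_mem_dropWhile_beq (c : Char) : ∀ (l : List Char), (∀ x ∈ l, c ≤ x) →
    l.Pairwise (· ≤ ·) → c ∉ l.dropWhile (fun x => x == c) := by
  intro l
  induction l with
  | nil => simp
  | cons y u ih =>
    intro hle hpw h
    by_cases hyc : y = c
    · rw [List.dropWhile_cons_of_pos (by simp [hyc])] at h
      exact ih (fun x hx => hle x (by simp [hx])) (List.pairwise_cons.1 hpw).2 h
    · rw [List.dropWhile_cons_of_neg (by simp [hyc])] at h
      have hcy : c < y := lt_of_le_of_ne (hle y (by simp)) (Ne.symm hyc)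
      rcases List.mem_cons.1 h with hc | hc
      · exact hyc hc.symm
      · exact absurd hcy (not_lt.2 ((List.pairwise_cons.1 hpw).1 c hc))

-- shared facts about one block of the run-length scan of a sorted list
theorem run_block (c : Char) (rest : List Char)
    (h : (c :: rest).Pairwise (· ≤ ·)) :
    (∀ x ∈ rest.takeWhile (fun x => x == c), x = c) ∧
    c ∉ rest.dropWhile (fun x => x == c) ∧
    (rest.dropWhile (fun x => x == c)).Pairwise (· ≤ ·) ∧
    (c :: rest).count c = 1 + (rest.takeWhile (fun x => x == c)).length ∧
    (∀ x, x ≠ c → (c :: rest).count x = (rest.dropWhile (fun x => x == c)).count x) := by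
  have hrest : rest.Pairwise (· ≤ ·) := (List.pairwise_cons.1 h).2
  have hcle : ∀ x ∈ rest, c ≤ x := (List.pairwise_cons.1 h).1
  have htw : ∀ x ∈ rest.takeWhile (fun x => x == c), x = c := by
    intro x hx
    have hx2 := List.mem_takeWhile_imp hx
    simpa using hx2
  have hdw_pw : (rest.dropWhile (fun x => x == c)).Pairwise (· ≤ ·) :=
    List.Pairwise.sublist (List.dropWhile_sublist _) hrest
  have hcndw : c ∉ rest.dropWhile (fun x => x == c) :=
    not_mem_dropWhile_beq c rest hcle hrest
  have h1 : rest = rest.takeWhile (fun x => x == c) ++ rest.dropWhile (fun x => x == c) :=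
    (List.takeWhile_append_dropWhile).symm
  have htwc : (rest.takeWhile (fun x => x == c)).count c = (rest.takeWhile (fun x => x == c)).length := by
    rw [List.count_eq_length]
    intro b hb
    rw [htw b hb]
  refine ⟨htw, hcndw, hdw_pw, ?_, ?_⟩
  · rw [List.count_cons_self]
    conv_lhs => rw [h1]
    rw [List.count_append, htwc, List.count_eq_zero.2 hcndw]
    omega
  · intro x hx
    have hstep : (c :: rest).count x = rest.count x := by
      simp [Ne.symm hx]
    rw [hstep]
    conv_lhs => rw [h1]
    rw [List.count_append]
    have hz : (rest.takeWhile (fun y => y == c)).count x = 0 := by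
      rw [List.count_eq_zero]
      intro hc
      exact hx (htw x hc)
    omega

theorem runs_mem : ∀ (S : List Char), S.Pairwise (· ≤ ·) →
    ∀ p ∈ pvRuns S, p.1 ∈ S ∧ p.2 = (S.count p.1 : Int) := by
  intro S
  induction S using pvRuns.induct with
  | case1 => intro _ p hp; simp [pvRuns] at hp
  | case2 c rest ih =>
    intro h p hp
    obtain ⟨htw, hcndw, hdw_pw, hcount, hcount2⟩ := run_block c rest h
    rw [pvRuns] at hp
    rcases List.mem_cons.1 hp with hph | hpt
    · subst hph
      refine ⟨by simp, ?_⟩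
      simp only []
      rw [hcount]
      push_cast
      ring
    · obtain ⟨hmem, hcnt⟩ := ih hdw_pw p hpt
      have hne : p.1 ≠ c := fun hc => hcndw (hc ▸ hmem)
      refine ⟨?_, ?_⟩
      · have : p.1 ∈ rest := (List.dropWhile_sublist _).mem hmem
        exact List.mem_cons_of_mem _ this
      · rw [hcnt, hcount2 p.1 hne]

theorem runs_cover : ∀ (S : List Char), S.Pairwise (· ≤ ·) →
    ∀ x ∈ S, (x, (S.count x : Int)) ∈ pvRuns S := by
  intro S
  induction S using pvRuns.induct with
  | case1 => intro _ x hx; simp at hx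
  | case2 c rest ih =>
    intro h x hx
    obtain ⟨htw, hcndw, hdw_pw, hcount, hcount2⟩ := run_block c rest h
    rw [pvRuns]
    by_cases hxc : x = c
    · subst hxc
      refine List.mem_cons.2 (Or.inl ?_)
      rw [Prod.mk.injEq]
      refine ⟨rfl, ?_⟩
      rw [hcount]
      push_cast
      ring
    · have hxrest : x ∈ rest := by
        rcases List.mem_cons.1 hx with hc | hc
        · exact absurd hc hxc
        · exact hc
      have hxdw : x ∈ rest.dropWhile (fun y => y == c) := by
        rw [← List.takeWhile_append_dropWhile (p := fun y => y == c) (l := rest)] at hxrest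
        rcases List.mem_append.1 hxrest with hc | hc
        · exact absurd (htw x hc) hxc
        · exact hc
      have := ih hdw_pw x hxdw
      rw [hcount2 x hxc]
      exact List.mem_cons_of_mem _ this

-- B's selection fold dominates every pair it saw (lexicographically: count, then -index)
theorem fold_lex (idx : Char → Int) :
    ∀ (rs : List (Char × Int)) (b : Char × Int),
      (rs.foldl (fun best cand =>
          if cand.2 > best.2 ∨ (cand.2 = best.2 ∧ idx cand.1 < idx best.1) then cand else best) b = b ∨
       rs.foldl (fun best cand =>
          if cand.2 > best.2 ∨ (cand.2 = best.2 ∧ idx cand.1 < idx best.1) then cand else best) b ∈ rs) ∧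
      ∀ p ∈ b :: rs,
        p.2 ≤ (rs.foldl (fun best cand =>
          if cand.2 > best.2 ∨ (cand.2 = best.2 ∧ idx cand.1 < idx best.1) then cand else best) b).2 ∧
        (p.2 = (rs.foldl (fun best cand =>
          if cand.2 > best.2 ∨ (cand.2 = best.2 ∧ idx cand.1 < idx best.1) then cand else best) b).2 →
          idx (rs.foldl (fun best cand =>
          if cand.2 > best.2 ∨ (cand.2 = best.2 ∧ idx cand.1 < idx best.1) then cand else best) b).1 ≤ idx p.1) := by
  intro rs
  induction rs with
  | nil =>
    intro b
    refine ⟨Or.inl rfl, ?_⟩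
    intro p hp
    simp only [List.mem_singleton] at hp
    subst hp
    exact ⟨le_refl _, fun _ => le_refl _⟩
  | cons c u ih =>
    intro b
    simp only [List.foldl_cons]
    by_cases hbeat : c.2 > b.2 ∨ (c.2 = b.2 ∧ idx c.1 < idx b.1)
    · simp only [if_pos hbeat]
      obtain ⟨hmem, hdom⟩ := ih c
      refine ⟨?_, ?_⟩
      · rcases hmem with hm | hm
        · exact Or.inr (by simp [hm])
        · exact Or.inr (by simp [hm])
      · intro p hp
        rcases List.mem_cons.1 hp with hpb | hp'
        · rw [hpb]
          obtain ⟨h1, h2⟩ := hdom c (by simp)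
          rcases hbeat with hlt | ⟨heq, hidx⟩
          · exact ⟨by omega, fun he => by omega⟩
          · refine ⟨by omega, fun he => ?_⟩
            have := h2 (by omega)
            omega
        · exact hdom p hp'
    · simp only [if_neg hbeat]
      have hc1 : c.2 ≤ b.2 := by
        by_contra hcon
        exact hbeat (Or.inl (by omega))
      have hc2 : c.2 = b.2 → idx b.1 ≤ idx c.1 := by
        intro he
        by_contra hcon
        exact hbeat (Or.inr ⟨he, by omega⟩)
      obtain ⟨hmem, hdom⟩ := ih b
      refine ⟨?_, ?_⟩
      · rcases hmem with hm | hm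
        · exact Or.inl hm
        · exact Or.inr (by simp [hm])
      · intro p hp
        rcases List.mem_cons.1 hp with hpb | hp'
        · rw [hpb]
          exact hdom b (by simp)
        · rcases List.mem_cons.1 hp' with hpc | hp''
          · rw [hpc]
            obtain ⟨h1, h2⟩ := hdom b (by simp)
            refine ⟨by omega, fun he => ?_⟩
            have hb2 := h2 (by omega)
            have := hc2 (by omega)
            omega
          · exact hdom p (by simp [hp''])

-- A's winner dominates every letter: maximal count, earliest first occurrence on ties
theorem A_winner (text : String) (w : Char)
    (hw : PySem.List.max? (PySem.List.dedup (text.toList.filter PySem.Chars.isalpha))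
            (fun c => (text.toList.count c : Int)) = some w) :
    w ∈ text.toList.filter PySem.Chars.isalpha ∧
    ∀ x ∈ text.toList.filter PySem.Chars.isalpha,
      text.toList.count x ≤ text.toList.count w ∧
      (text.toList.count x = text.toList.count w → text.toList.idxOf w ≤ text.toList.idxOf x) := by
  have hpwD : (PySem.List.dedup (text.toList.filter PySem.Chars.isalpha)).Pairwise
      (fun a b => text.toList.idxOf a < text.toList.idxOf b) := by
    apply List.Pairwise.imp_of_mem ?_ (dedup_pairwise_idxOf (text.toList.filter PySem.Chars.isalpha))
    intro a b hma hmb hab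
    exact idxOf_filter_lt _ _ _ _ ((PySem.List.mem_dedup _ _).1 hma)
      ((PySem.List.mem_dedup _ _).1 hmb) hab
  cases hD : PySem.List.dedup (text.toList.filter PySem.Chars.isalpha) with
  | nil =>
    rw [hD] at hw
    simp [PySem.List.max?] at hw
  | cons d dt =>
    rw [hD] at hw hpwD
    rw [max?_cons] at hw
    have hw' := Option.some_inj.1 hw
    obtain ⟨hmem, hdom⟩ := fold_dom (fun c => (text.toList.count c : Int))
      (fun c => text.toList.idxOf c) dt d
      ((List.pairwise_cons.1 hpwD).1) ((List.pairwise_cons.1 hpwD).2)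
    rw [hw'] at hmem hdom
    constructor
    · have : w ∈ d :: dt := by
        rcases hmem with hm | hm
        · rw [hm]; simp
        · simp [hm]
      rw [← hD] at this
      exact (PySem.List.mem_dedup _ _).1 this
    · intro x hx
      have hxD : x ∈ d :: dt := by
        rw [← hD]
        exact (PySem.List.mem_dedup _ _).2 hx
      obtain ⟨h1, h2⟩ := hdom x hxD
      refine ⟨by exact_mod_cast h1, fun he => h2 (by exact_mod_cast he)⟩

-- B's winner dominates every letter as well
theorem B_winner (text : String) (b : Char × Int) (rest : List (Char × Int))
    (hruns : pvRuns (PySem.List.sorted (text.toList.filter PySem.Chars.isalpha) (fun c => c) false)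
      = b :: rest) :
    (rest.foldl (fun best cand =>
        if cand.2 > best.2 ∨ (cand.2 = best.2 ∧
            ((text.toList.idxOf cand.1 : Int)) < ((text.toList.idxOf best.1 : Int))) then cand
        else best) b).1 ∈ text.toList.filter PySem.Chars.isalpha ∧
    ∀ x ∈ text.toList.filter PySem.Chars.isalpha,
      text.toList.count x ≤ text.toList.count (rest.foldl (fun best cand =>
        if cand.2 > best.2 ∨ (cand.2 = best.2 ∧
            ((text.toList.idxOf cand.1 : Int)) < ((text.toList.idxOf best.1 : Int))) then cand
        else best) b).1 ∧
      (text.toList.count x = text.toList.count (rest.foldl (fun best cand =>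
        if cand.2 > best.2 ∨ (cand.2 = best.2 ∧
            ((text.toList.idxOf cand.1 : Int)) < ((text.toList.idxOf best.1 : Int))) then cand
        else best) b).1 →
        text.toList.idxOf (rest.foldl (fun best cand =>
        if cand.2 > best.2 ∨ (cand.2 = best.2 ∧
            ((text.toList.idxOf cand.1 : Int)) < ((text.toList.idxOf best.1 : Int))) then cand
        else best) b).1 ≤ text.toList.idxOf x) := by
  have hSpw : (PySem.List.sorted (text.toList.filter PySem.Chars.isalpha) (fun c => c) false).Pairwise (· ≤ ·) := by
    simpa using PySem.List.sorted_pairwise (text.toList.filter PySem.Chars.isalpha) (fun c => c)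
  have hconv : ∀ y ∈ PySem.List.sorted (text.toList.filter PySem.Chars.isalpha) (fun c => c) false,
      (PySem.List.sorted (text.toList.filter PySem.Chars.isalpha) (fun c => c) false).count y
        = text.toList.count y := by
    intro y hy
    rw [(PySem.List.sorted_perm (text.toList.filter PySem.Chars.isalpha) (fun c => c) false).count_eq]
    exact List.count_filter (List.mem_filter.1 ((PySem.List.mem_sorted _ _ _ _).1 hy)).2
  obtain ⟨hmem, hdom⟩ := fold_lex (fun c => (text.toList.idxOf c : Int)) rest b
  have hrmem : (rest.foldl (fun best cand =>
        if cand.2 > best.2 ∨ (cand.2 = best.2 ∧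
            ((text.toList.idxOf cand.1 : Int)) < ((text.toList.idxOf best.1 : Int))) then cand
        else best) b) ∈ pvRuns (PySem.List.sorted (text.toList.filter PySem.Chars.isalpha) (fun c => c) false) := by
    rw [hruns]
    rcases hmem with hm | hm
    · rw [hm]; exact List.mem_cons_self
    · exact List.mem_cons_of_mem _ hm
  obtain ⟨hr1, hr2⟩ := runs_mem _ hSpw _ hrmem
  constructor
  · exact (PySem.List.mem_sorted _ _ _ _).1 hr1
  · intro x hx
    have hxS : x ∈ PySem.List.sorted (text.toList.filter PySem.Chars.isalpha) (fun c => c) false :=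
      (PySem.List.mem_sorted _ _ _ _).2 hx
    have hcov := runs_cover _ hSpw x hxS
    rw [hruns] at hcov
    obtain ⟨h1, h2⟩ := hdom _ hcov
    simp only [] at h1 h2
    rw [hr2, hconv _ hr1, hconv x hxS] at h1 h2
    refine ⟨by exact_mod_cast h1, fun he => by exact_mod_cast h2 (by exact_mod_cast he)⟩

-- ===== VERDICT (by name: the statement is the Claim_ definition above) =====
theorem possibleRot_spec : Claim_equal_possibleRot := by
  intro text hdom hpre
  unfold Pre_possibleRot at hpre
  unfold Spec_possibleRot
  obtain ⟨cw, hcwmem, hcwal⟩ : ∃ c ∈ text.toList, PySem.Chars.isalpha c := by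
    simpa [List.any_eq_true] using hpre
  have hcL : cw ∈ text.toList.filter PySem.Chars.isalpha := List.mem_filter.2 ⟨hcwmem, hcwal⟩
  have hSpw : (PySem.List.sorted (text.toList.filter PySem.Chars.isalpha) (fun c => c) false).Pairwise (· ≤ ·) := by
    simpa using PySem.List.sorted_pairwise (text.toList.filter PySem.Chars.isalpha) (fun c => c)
  simp only [possibleRot, possibleRot_alt]
  rw [max?_eq]
  cases hmax : PySem.List.max? (PySem.List.dedup (text.toList.filter PySem.Chars.isalpha))
      (fun c => (text.toList.count c : Int)) with
  | none =>
    exfalso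
    have : cw ∈ PySem.List.dedup (text.toList.filter PySem.Chars.isalpha) :=
      (PySem.List.mem_dedup _ _).2 hcL
    rw [(PySem.List.max?_eq_none_iff _ _).1 hmax] at this
    simp at this
  | some w =>
    cases hruns : pvRuns (PySem.List.sorted (text.toList.filter PySem.Chars.isalpha) (fun c => c) false) with
    | nil =>
      exfalso
      have := runs_cover _ hSpw cw ((PySem.List.mem_sorted _ _ _ _).2 hcL)
      rw [hruns] at this
      simp at this
    | cons b rest =>
      obtain ⟨hwm, hwd⟩ := A_winner text w hmax
      obtain ⟨hrm, hrd⟩ := B_winner text b rest hruns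
      have h1 := hwd _ hrm
      have h2 := hrd _ hwm
      have hcnt : text.toList.count w = text.toList.count ((rest.foldl (fun best cand =>
          if cand.2 > best.2 ∨ (cand.2 = best.2 ∧
              ((text.toList.idxOf cand.1 : Int)) < ((text.toList.idxOf best.1 : Int))) then cand
          else best) b).1) := le_antisymm h2.1 h1.1
      have hidx : text.toList.idxOf w = text.toList.idxOf ((rest.foldl (fun best cand =>
          if cand.2 > best.2 ∨ (cand.2 = best.2 ∧
              ((text.toList.idxOf cand.1 : Int)) < ((text.toList.idxOf best.1 : Int))) then cand
          else best) b).1) := le_antisymm (h1.2 hcnt.symm) (h2.2 hcnt)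
      have hwr : w = (rest.foldl (fun best cand =>
          if cand.2 > best.2 ∨ (cand.2 = best.2 ∧
              ((text.toList.idxOf cand.1 : Int)) < ((text.toList.idxOf best.1 : Int))) then cand
          else best) b).1 :=
        idxOf_inj text.toList (List.mem_filter.1 hwm).1 (List.mem_filter.1 hrm).1 hidx
      dsimp only []
      by_cases hlen : (text.toList.length : Int) ≤ 10
      · rw [if_pos hlen, if_neg (show ¬((text.toList.length : Int) > 10) by omega)]
      · rw [if_neg hlen, if_pos (show (text.toList.length : Int) > 10 by omega), ← hwr]
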